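-- pv_equiv track=rewrite | github.com/milenagsoares/Complexibilidade-computabilidade | atividades_sala/numero.py | reconhece_numero
-- ===== SOURCE A (Python) =====
-- def reconhece_numero(string):
--     estado = 'q0'
--
--     for char in string:
--
--         if estado == 'q0':
--             if char.isdigit():
--                 estado = 'q1'
--             else:
--                 estado = 'q_rejeita'
--                 break
--         elif estado == 'q1':
--             if char.isdigit():
--                 estado = 'q1'
--             elif char == '.':
--                 estado = 'q2'
--             else:
--                 estado = 'q_rejeita'
--                 break
--
--
--         elif estado == 'q2':
--             if char.isdigit():
--                 estado = 'q3'
--             else: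
--                 estado = 'q_rejeita'
--                 break
--
--         elif estado == 'q3':
--             if char.isdigit():
--                 estado = 'q3'
--             else:
--                 estado = 'q_rejeita'
--                 break
--
--     if estado in ['q1', 'q3']:
--         return "Número válido"
--     else:
--         return "Número invalido!"
-- ===== SOURCE B (Python) =====
-- def reconhece_numero(string):
--     head, sep, tail = string.partition('.')
--     if head.isdigit() and (not sep or tail.isdigit()):
--         return "Número válido"
--     return "Número invalido!"
-- ===== Notes on version B (the rewrite author's own statement) =====
-- stated objective: simpler
-- what changed: Replaces the per-character DFA with a single partition at the first dot plus whole-segment isdigit checks (empty-segment and second-dot cases fall out of isdigit being False there).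
import Mathlib
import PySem

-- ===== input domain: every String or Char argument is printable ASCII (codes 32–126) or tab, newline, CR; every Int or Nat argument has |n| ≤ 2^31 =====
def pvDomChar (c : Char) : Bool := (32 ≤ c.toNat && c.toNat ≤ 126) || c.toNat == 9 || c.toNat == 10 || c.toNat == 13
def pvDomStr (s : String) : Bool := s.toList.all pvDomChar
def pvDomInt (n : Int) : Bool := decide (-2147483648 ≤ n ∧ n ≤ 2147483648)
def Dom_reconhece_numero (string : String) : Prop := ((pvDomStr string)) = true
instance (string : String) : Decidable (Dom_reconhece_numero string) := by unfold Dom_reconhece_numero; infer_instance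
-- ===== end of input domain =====

-- B replaces A's per-character DFA by one partition at the first '.' plus whole-segment isdigit checks (simpler; same cost).

-- ===== PORT A =====
-- DFA state of A's loop
inductive PvSt where
  | q0 | q1 | q2 | q3 | rej
deriving DecidableEq, Repr

-- A's for-loop; 'break' with estado = 'q_rejeita' returns .rej immediately.
-- char.isdigit is PySem.Chars.isdigit (exact on the ASCII domain).
def pvLoopA : List Char → PvSt → PvSt
  | [], st => st
  | c :: cs, st =>
    match st with
    | .q0 => if PySem.Chars.isdigit c then pvLoopA cs .q1 else .rej
    | .q1 => if PySem.Chars.isdigit c then pvLoopA cs .q1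
             else if c = '.' then pvLoopA cs .q2 else .rej
    | .q2 => if PySem.Chars.isdigit c then pvLoopA cs .q3 else .rej
    | .q3 => if PySem.Chars.isdigit c then pvLoopA cs .q3 else .rej
    | .rej => .rej

def reconhece_numero (string : String) : String :=
  let st := pvLoopA string.toList .q0
  if st == .q1 || st == .q3 then "Número válido" else "Número invalido!"

-- ===== PORT B =====
-- hand port of str.partition('.') for the single-char separator '.': exact —
-- (before first '.', whether a '.' occurred, after it); Python returns ('', '') for sep/tail when absent.
def pvPartitionDot : List Char → List Char × Bool × List Char
  | [] => ([], false, [])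
  | c :: cs =>
    if c = '.' then ([], true, cs)
    else
      let p := pvPartitionDot cs
      (c :: p.1, p.2.1, p.2.2)

def reconhece_numero_alt (string : String) : String :=
  let p := pvPartitionDot string.toList
  if PySem.Chars.strIsdigit p.1 && (!p.2.1 || PySem.Chars.strIsdigit p.2.2) then
    "Número válido"
  else "Número invalido!"

-- ===== PRECONDITION & SPEC =====
def Spec_reconhece_numero (string : String) (out : String) : Prop := out = reconhece_numero_alt string
instance (string : String) (out : String) : Decidable (Spec_reconhece_numero string out) := by unfold Spec_reconhece_numero; infer_instance

-- ===== CLAIM (what is proved, stated in full; the proofs are below) =====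
def Claim_equal_reconhece_numero : Prop := ∀ (string : String), Dom_reconhece_numero string → Spec_reconhece_numero string (reconhece_numero string)

-- ===== LEMMAS AND PROOFS =====

theorem pv_digit_ne_dot {c : Char} (h : PySem.Chars.isdigit c = true) : c ≠ '.' := by
  intro e; subst e; simp [PySem.Chars.isdigit] at h

theorem pv_loop_q3 (cs : List Char) :
    (pvLoopA cs .q3 == .q1 || pvLoopA cs .q3 == .q3) = cs.all PySem.Chars.isdigit := by
  induction cs with
  | nil => rfl
  | cons c cs ih =>
    by_cases h : PySem.Chars.isdigit c = true
    · simp [pvLoopA, h, ih]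
    · simp at h; simp [pvLoopA, h]

theorem pv_loop_q2 (cs : List Char) :
    (pvLoopA cs .q2 == .q1 || pvLoopA cs .q2 == .q3) = PySem.Chars.strIsdigit cs := by
  cases cs with
  | nil => rfl
  | cons c cs =>
    by_cases h : PySem.Chars.isdigit c = true
    · simp [pvLoopA, h, pv_loop_q3, PySem.Chars.strIsdigit]
    · simp at h; simp [pvLoopA, h, PySem.Chars.strIsdigit]

theorem pv_loop_q1 (cs : List Char) :
    (pvLoopA cs .q1 == .q1 || pvLoopA cs .q1 == .q3) =
      ((pvPartitionDot cs).1.all PySem.Chars.isdigit &&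
        (!(pvPartitionDot cs).2.1 || PySem.Chars.strIsdigit (pvPartitionDot cs).2.2)) := by
  induction cs with
  | nil => rfl
  | cons c cs ih =>
    by_cases h : PySem.Chars.isdigit c = true
    · have hne := pv_digit_ne_dot h
      simp [pvLoopA, pvPartitionDot, h, hne, ih]
    · by_cases hd : c = '.'
      · subst hd
        simp [pvLoopA, pvPartitionDot, h, pv_loop_q2]
      · simp at h
        simp [pvLoopA, pvPartitionDot, h, hd]

-- ===== VERDICT (by name: the statement is the Claim_ definition above) =====
theorem reconhece_numero_spec : Claim_equal_reconhece_numero := by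
  intro s _
  unfold Spec_reconhece_numero reconhece_numero reconhece_numero_alt
  cases hc : s.toList with
  | nil => rfl
  | cons c cs =>
    by_cases h : PySem.Chars.isdigit c = true
    · have hne := pv_digit_ne_dot h
      simp [pvLoopA, pvPartitionDot, h, hne, pv_loop_q1, PySem.Chars.strIsdigit]
    · by_cases hd : c = '.'
      · subst hd
        simp [pvLoopA, pvPartitionDot, h, PySem.Chars.strIsdigit]
      · simp at h
        simp [pvLoopA, pvPartitionDot, h, hd, PySem.Chars.strIsdigit]
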